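-- pv_equiv track=rewrite | github.com/Twsharky21/Turbo_Extractor | core/transform.py | shape_keep
-- ===== SOURCE A (Python) =====
-- from typing import List, Any
--
-- def shape_keep(
--     original_rows: List[List[Any]],
--     selected_row_indices: List[int],
--     selected_col_indices: List[int],
-- ) -> List[List[Any]]:
--     """
--     Keep Format: compress rows (no empty rows), but preserve column spacing.
--
--     Output rows = only the selected rows (no gaps between rows).
--     Output columns = full bounding box from min_col to max_col, with None
--     in positions that were not selected (column gaps preserved).
--
--     Example: source columns A,B,C,D,E with C,E selected (indices 2,4):
--       - min_col=2, max_col=4 → output width = 3 (C, D, E)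
--       - output[r][0] = source col C, output[r][1] = None (D gap),
--         output[r][2] = source col E
--       - One output row per selected row; no empty rows.
--     """
--     if not original_rows:
--         return []
--
--     if not selected_row_indices:
--         selected_row_indices = list(range(len(original_rows)))
--
--     if not selected_col_indices:
--         selected_col_indices = list(range(len(original_rows[0])))
--
--     min_c = min(selected_col_indices)
--     max_c = max(selected_col_indices)
--     col_set = set(selected_col_indices)
--
--     shaped = []
--
--     for r in selected_row_indices:
--         if r >= len(original_rows):
--             continue
--         row = []
--         for c in range(min_c, max_c + 1):
--             if c in col_set:
--                 src_row = original_rows[r]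
--                 row.append(src_row[c] if c < len(src_row) else None)
--             else:
--                 row.append(None)
--         shaped.append(row)
--
--     return shaped
-- ===== SOURCE B (Python) =====
-- from typing import List, Any
--
-- def shape_keep(
--     original_rows: List[List[Any]],
--     selected_row_indices: List[int],
--     selected_col_indices: List[int],
-- ) -> List[List[Any]]:
--     if not original_rows:
--         return []
--     rows = selected_row_indices or range(len(original_rows))
--     cols = selected_col_indices or range(len(original_rows[0]))
--     min_c, max_c = min(cols), max(cols)
--     col_set = set(cols)
--     srcs = [original_rows[r] for r in rows if r < len(original_rows)]
--     if not srcs: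
--         return []
--     cols_out = []
--     for c in range(min_c, max_c + 1):
--         if c in col_set:
--             cols_out.append([src[c] if c < len(src) else None for src in srcs])
--         else:
--             cols_out.append([None] * len(srcs))
--     return [list(t) for t in zip(*cols_out)]
-- ===== Notes on version B (the rewrite author's own statement) =====
-- stated objective: alternative
-- what changed: A builds the output row-major with a per-cell membership test inside a nested loop; B builds it column-major (one full column per bounding-box column, gap columns as a single None block) and transposes with zip(*...), so the row-major nested scan disappears.
import Mathlib
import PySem

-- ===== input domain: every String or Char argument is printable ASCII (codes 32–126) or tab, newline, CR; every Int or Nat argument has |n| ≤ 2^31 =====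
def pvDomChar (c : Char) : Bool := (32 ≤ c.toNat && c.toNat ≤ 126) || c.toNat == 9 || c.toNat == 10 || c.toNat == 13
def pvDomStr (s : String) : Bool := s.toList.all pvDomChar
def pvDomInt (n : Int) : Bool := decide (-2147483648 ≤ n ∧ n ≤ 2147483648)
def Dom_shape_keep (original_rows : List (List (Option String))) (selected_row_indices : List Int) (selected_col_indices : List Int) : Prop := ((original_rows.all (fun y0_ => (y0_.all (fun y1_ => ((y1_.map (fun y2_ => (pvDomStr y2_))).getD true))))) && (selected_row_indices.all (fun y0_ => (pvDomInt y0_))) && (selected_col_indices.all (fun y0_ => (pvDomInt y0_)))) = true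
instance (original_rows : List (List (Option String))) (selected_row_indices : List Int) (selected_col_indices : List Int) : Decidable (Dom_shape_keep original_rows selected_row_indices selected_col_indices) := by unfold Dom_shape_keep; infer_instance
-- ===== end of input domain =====

-- B builds the result column-major (one full column per bounding-box column, gap columns
-- as one None block) and transposes with zip(*...), instead of A's row-major nested
-- per-cell membership scan.
-- ===== PORT A =====
def shape_keep (original_rows : List (List (Option String))) (selected_row_indices : List Int) (selected_col_indices : List Int) : List (List (Option String)) :=
  if original_rows = [] then []
  else
    let sri := if selected_row_indices = [] then PySem.List.pyRange 0 (original_rows.length : Int) 1 else selected_row_indices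
    let sci := if selected_col_indices = [] then PySem.List.pyRange 0 ((original_rows.headI).length : Int) 1 else selected_col_indices
    let min_c := (PySem.List.min? sci (fun x => x)).getD 0
    let max_c := (PySem.List.max? sci (fun x => x)).getD 0
    let col_set := PySem.Set.ofList sci
    sri.foldl (fun shaped r =>
      if (original_rows.length : Int) ≤ r then shaped
      else
        shaped ++ [(PySem.List.pyRange min_c (max_c + 1) 1).foldl (fun row c =>
          if PySem.Set.contains col_set c then
            let src_row := (PySem.List.pyGet? original_rows r).getD []
            row ++ [if c < (src_row.length : Int) then (PySem.List.pyGet? src_row c).getD none else none]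
          else row ++ [none]) []]) []

-- ===== PORT B =====
-- zip(*cols_out) / [list(t) for t in zip(*cols_out)]: truncating transpose
def zipStar (ls : List (List (Option String))) : List (List (Option String)) :=
  if h : ls = [] ∨ ls.any List.isEmpty then []
  else (ls.map List.headI) :: zipStar (ls.map List.tail)
termination_by (ls.headI).length
decreasing_by
  push Not at h
  obtain ⟨h1, h2⟩ := h
  obtain ⟨a, t, rfl⟩ := List.exists_cons_of_ne_nil h1
  have ha : a ≠ [] := by
    intro hz
    exact h2 (by simp [hz])
  cases a with
  | nil => exact absurd rfl ha
  | cons x xs => simp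

def shape_keep_alt (original_rows : List (List (Option String))) (selected_row_indices : List Int) (selected_col_indices : List Int) : List (List (Option String)) :=
  if original_rows = [] then []
  else
    let rows := if selected_row_indices = [] then PySem.List.pyRange 0 (original_rows.length : Int) 1 else selected_row_indices
    let cols := if selected_col_indices = [] then PySem.List.pyRange 0 ((original_rows.headI).length : Int) 1 else selected_col_indices
    let min_c := (PySem.List.min? cols (fun x => x)).getD 0
    let max_c := (PySem.List.max? cols (fun x => x)).getD 0
    let cset := PySem.Set.ofList cols
    let srcs := (rows.filter (fun r => decide (r < (original_rows.length : Int)))).map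
      (fun r => (PySem.List.pyGet? original_rows r).getD [])
    if srcs = [] then []
    else
      let colsOut := (PySem.List.pyRange min_c (max_c + 1) 1).map (fun c =>
        if PySem.Set.contains cset c then
          srcs.map (fun src => if c < (src.length : Int) then (PySem.List.pyGet? src c).getD none else none)
        else List.replicate srcs.length none)
      zipStar colsOut

-- ===== PRECONDITION & SPEC =====
-- Pre_ excludes only inputs where Python A raises: a ValueError from min()/max() when both
-- selected_col_indices and the first row are empty, and IndexError from a negative row index
-- below -len(original_rows) or a negative selected column index below -len of an accessed row.
def Pre_shape_keep (original_rows : List (List (Option String))) (selected_row_indices : List Int) (selected_col_indices : List Int) : Prop :=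
  original_rows = [] ∨
  ((if selected_col_indices = [] then original_rows.headI ≠ [] else True) ∧
   ∀ r ∈ (if selected_row_indices = [] then PySem.List.pyRange 0 (original_rows.length : Int) 1 else selected_row_indices),
     r < (original_rows.length : Int) →
       -(original_rows.length : Int) ≤ r ∧
       ∀ c ∈ (if selected_col_indices = [] then PySem.List.pyRange 0 ((original_rows.headI).length : Int) 1 else selected_col_indices),
         -((((PySem.List.pyGet? original_rows r).getD []).length : Int)) ≤ c)
instance (original_rows : List (List (Option String))) (selected_row_indices : List Int) (selected_col_indices : List Int) : Decidable (Pre_shape_keep original_rows selected_row_indices selected_col_indices) := by unfold Pre_shape_keep; infer_instance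
def pvWitness_shape_keep : List (List (Option String)) × List Int × List Int := ([[some "a", none, some "b"]], [0], [0, 2])
def Spec_shape_keep (original_rows : List (List (Option String))) (selected_row_indices : List Int) (selected_col_indices : List Int) (out : List (List (Option String))) : Prop := out = shape_keep_alt original_rows selected_row_indices selected_col_indices
instance (original_rows : List (List (Option String))) (selected_row_indices : List Int) (selected_col_indices : List Int) (out : List (List (Option String))) : Decidable (Spec_shape_keep original_rows selected_row_indices selected_col_indices out) := by unfold Spec_shape_keep; infer_instance

-- ===== CLAIM =====
def Claim_equal_shape_keep : Prop := ∀ (original_rows : List (List (Option String))) (selected_row_indices : List Int) (selected_col_indices : List Int), Dom_shape_keep original_rows selected_row_indices selected_col_indices → Pre_shape_keep original_rows selected_row_indices selected_col_indices → Spec_shape_keep original_rows selected_row_indices selected_col_indices (shape_keep original_rows selected_row_indices selected_col_indices)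

-- ===== LEMMAS AND PROOFS =====

-- transposing a rectangular grid given column-major as a map over columns
lemma zipStar_grid (f : Int → List (Option String) → Option String)
    (srcs : List (List (Option String))) (c0 : Int) (R : List Int) :
    zipStar ((c0 :: R).map (fun c => srcs.map (f c)))
      = srcs.map (fun src => (c0 :: R).map (fun c => f c src)) := by
  induction srcs with
  | nil =>
    rw [zipStar]
    simp
  | cons s t ih =>
    rw [zipStar, dif_neg (by simp)]
    have h1 : ((c0 :: R).map (fun c => (s :: t).map (f c))).map List.headI
        = (c0 :: R).map (fun c => f c s) := by
      rw [List.map_map]; rfl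
    have h2 : ((c0 :: R).map (fun c => (s :: t).map (f c))).map List.tail
        = (c0 :: R).map (fun c => t.map (f c)) := by
      rw [List.map_map]; rfl
    rw [h1, h2, ih]
    rfl

-- A's skip-and-append fold over the row indices = map over the kept (filtered) indices
lemma foldl_skip_append (n : Int) (g : Int → List (Option String)) (rows : List Int)
    (acc : List (List (Option String))) :
    rows.foldl (fun shaped r => if n ≤ r then shaped else shaped ++ [g r]) acc
      = acc ++ (rows.filter (fun r => decide (r < n))).map g := by
  induction rows generalizing acc with
  | nil => simp
  | cons r t ih =>
    simp only [List.foldl_cons, List.filter_cons]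
    by_cases hr : n ≤ r
    · rw [if_pos hr, if_neg (by simpa using hr), ih]
    · rw [if_neg hr, if_pos (by simp; omega), ih]
      simp
  
-- A's per-row fold over the bounding-box columns = map over those columns
lemma row_fold_eq_map (cset : PySem.Set Int) (src : List (Option String)) (R : List Int) :
    R.foldl (fun row c =>
        if PySem.Set.contains cset c then
          row ++ [if c < (src.length : Int) then (PySem.List.pyGet? src c).getD none else none]
        else row ++ [none]) []
      = R.map (fun c => if PySem.Set.contains cset c then
          (if c < (src.length : Int) then (PySem.List.pyGet? src c).getD none else none) else none) := by
  have hbody : (fun (row : List (Option String)) (c : Int) =>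
      if PySem.Set.contains cset c then
        row ++ [if c < (src.length : Int) then (PySem.List.pyGet? src c).getD none else none]
      else row ++ [none])
      = (fun row c => row ++ [if PySem.Set.contains cset c then
          (if c < (src.length : Int) then (PySem.List.pyGet? src c).getD none else none) else none]) := by
    funext row c; split <;> rfl
  rw [hbody, PySem.List.foldl_append_singleton_eq_map, List.nil_append]

-- the ports agree on every input (no Pre_ needed: the totalised primitives agree pointwise)
lemma ports_eq (original_rows : List (List (Option String))) (selected_row_indices : List Int) (selected_col_indices : List Int) :
    shape_keep original_rows selected_row_indices selected_col_indices
      = shape_keep_alt original_rows selected_row_indices selected_col_indices := by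
  unfold shape_keep shape_keep_alt
  split
  · rfl
  · set n : Int := (original_rows.length : Int) with hn
    set rows := if selected_row_indices = [] then PySem.List.pyRange 0 n 1 else selected_row_indices with hrows
    set cols := if selected_col_indices = [] then PySem.List.pyRange 0 ((original_rows.headI).length : Int) 1 else selected_col_indices with hcols
    set min_c := (PySem.List.min? cols (fun x => x)).getD 0 with hmin
    set max_c := (PySem.List.max? cols (fun x => x)).getD 0 with hmax
    set cset := PySem.Set.ofList cols with hcset
    set f : Int → List (Option String) → Option String := fun c src =>
      if PySem.Set.contains cset c then
        (if c < (src.length : Int) then (PySem.List.pyGet? src c).getD none else none)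
      else none with hf
    set srcf : Int → List (Option String) := fun r => (PySem.List.pyGet? original_rows r).getD [] with hsrcf
    set R := PySem.List.pyRange min_c (max_c + 1) 1 with hR
    -- the bounding-box range is never empty: min_c ≤ max_c (or both default to 0)
    have hRne : R ≠ [] := by
      have hmm : min_c ≤ max_c := by
        by_cases hc : cols = []
        · simp [hmin, hmax, hc, PySem.List.min?, PySem.List.max?]
        · obtain ⟨m, hm⟩ := Option.ne_none_iff_exists'.mp
            (fun h => hc ((PySem.List.min?_eq_none_iff cols (fun x => x)).mp h))
          obtain ⟨M, hM⟩ := Option.ne_none_iff_exists'.mp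
            (fun h => hc ((PySem.List.max?_eq_none_iff cols (fun x => x)).mp h))
          have := PySem.List.max?_isMax hM m (PySem.List.min?_mem hm)
          simp [hmin, hmax, hm, hM, this]
      have : min_c ∈ R := by
        rw [hR, PySem.List.pyRange_one]
        refine List.mem_map.mpr ⟨0, ?_, by simp⟩
        simp; omega
      exact List.ne_nil_of_mem this
    obtain ⟨c0, R', hRc⟩ := List.exists_cons_of_ne_nil hRne
    -- A side: fold over rows → map over filtered rows, each row a map over R
    have hA : rows.foldl (fun shaped r =>
        if n ≤ r then shaped
        else shaped ++ [R.foldl (fun row c =>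
          if PySem.Set.contains cset c then
            row ++ [if c < (((srcf r).length : Int)) then (PySem.List.pyGet? (srcf r) c).getD none else none]
          else row ++ [none]) []]) []
        = ((rows.filter (fun r => decide (r < n))).map srcf).map
            (fun src => R.map (fun c => f c src)) := by
      rw [foldl_skip_append n (fun r => R.foldl (fun row c =>
          if PySem.Set.contains cset c then
            row ++ [if c < (((srcf r).length : Int)) then (PySem.List.pyGet? (srcf r) c).getD none else none]
          else row ++ [none]) []) rows [], List.nil_append, List.map_map]
      refine List.map_congr_left (fun r _ => ?_)
      simp only [Function.comp]
      rw [row_fold_eq_map cset (srcf r) R]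
    -- B side: column grid + transpose
    have hB : zipStar (R.map (fun c =>
        if PySem.Set.contains cset c then
          ((rows.filter (fun r => decide (r < n))).map srcf).map
            (fun src => if c < (src.length : Int) then (PySem.List.pyGet? src c).getD none else none)
        else List.replicate ((rows.filter (fun r => decide (r < n))).map srcf).length none))
        = ((rows.filter (fun r => decide (r < n))).map srcf).map
            (fun src => R.map (fun c => f c src)) := by
      set srcs := (rows.filter (fun r => decide (r < n))).map srcf with hsrcs
      have hgrid : R.map (fun c =>
          if PySem.Set.contains cset c then
            srcs.map (fun src => if c < (src.length : Int) then (PySem.List.pyGet? src c).getD none else none)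
          else List.replicate srcs.length none)
          = R.map (fun c => srcs.map (f c)) := by
        refine List.map_congr_left (fun c _ => ?_)
        by_cases hmem : c ∈ cset
        · simp [hf, PySem.Set.contains, hmem]
        · simp [hf, PySem.Set.contains, hmem, List.map_const']
      rw [hgrid, hRc, zipStar_grid f srcs c0 R']
    by_cases hsr : (rows.filter (fun r => decide (r < n))).map srcf = []
    · rw [if_pos hsr, hA, hsr]
      rfl
    · rw [if_neg hsr]
      exact hA.trans hB.symm

-- ===== VERDICT =====
theorem shape_keep_spec : Claim_equal_shape_keep := by
  intro original_rows selected_row_indices selected_col_indices _ _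
  unfold Spec_shape_keep
  exact ports_eq original_rows selected_row_indices selected_col_indices
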